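-- pv_equiv track=rewrite | github.com/minnnnppp/Algorithm_study | 프로그래머스/1/42840. 모의고사/모의고사.py | solution
-- ===== SOURCE A (Python) =====
-- def solution(answers):
--     dict_answ = {
--         1: [1, 2, 3, 4, 5],
--         2: [2, 1, 2, 3, 2, 4, 2, 5],
--         3: [3, 3, 1, 1, 2, 2, 4, 4, 5, 5]
--     }
--     corrects_cnt = []
--
--     for k, v in dict_answ.items():
--         n = len(answers)//len(v)
--         r = len(answers)%len(v)
--         target = v*n + v[:r]
--         corrects = [y for x, y in zip(target, answers) if x == y]
--         corrects_cnt.append([k, len(corrects)])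
--
--     maxx = max(corrects_cnt, key = lambda x: x[1])[-1]
--
--     return sorted([x[0] for x in corrects_cnt if x[1]==maxx])
-- ===== SOURCE B (Python) =====
-- def solution(answers):
--     p1 = [1, 2, 3, 4, 5]
--     p2 = [2, 1, 2, 3, 2, 4, 2, 5]
--     p3 = [3, 3, 1, 1, 2, 2, 4, 4, 5, 5]
--     c1 = c2 = c3 = 0
--     for i, a in enumerate(answers):
--         if a == p1[i % 5]:
--             c1 += 1
--         if a == p2[i % 8]:
--             c2 += 1
--         if a == p3[i % 10]:
--             c3 += 1
--     m = max(c1, c2, c3)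
--     return [n for n, c in ((1, c1), (2, c2), (3, c3)) if c == m]
-- ===== Notes on version B (the rewrite author's own statement) =====
-- stated objective: faster
-- what changed: Instead of materialising, for each pattern, a full repeated target list of len(answers) elements and zip-filtering it, B does a single enumerate pass over the answers with three plain counters using modulo indexing into the fixed patterns, then selects the winners directly from the already-ordered triple of supposer counters instead of max-with-key plus filter plus sorted.
import Mathlib
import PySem

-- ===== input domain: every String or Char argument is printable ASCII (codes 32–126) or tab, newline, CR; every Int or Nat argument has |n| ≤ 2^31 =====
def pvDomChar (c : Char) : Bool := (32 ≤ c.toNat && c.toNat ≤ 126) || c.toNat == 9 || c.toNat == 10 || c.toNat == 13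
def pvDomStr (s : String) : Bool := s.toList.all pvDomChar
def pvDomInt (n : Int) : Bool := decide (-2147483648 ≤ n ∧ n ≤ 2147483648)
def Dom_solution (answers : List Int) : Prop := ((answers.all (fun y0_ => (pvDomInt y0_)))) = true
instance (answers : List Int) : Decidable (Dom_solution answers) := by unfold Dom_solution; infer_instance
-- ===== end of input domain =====

-- B replaces A's per-pattern repeated target lists + zip/filter by one enumerate pass with
-- three modulo-indexed counters and direct winner selection (no length-n target lists; the
-- timing run measured B faster by a constant factor).

-- ===== PORT A =====
-- the dict literal of A, as an insertion-ordered association list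
def solutionPatterns : List (Int × List Int) :=
  [(1, [1, 2, 3, 4, 5]), (2, [2, 1, 2, 3, 2, 4, 2, 5]), (3, [3, 3, 1, 1, 2, 2, 4, 4, 5, 5])]

-- v * n with n = len(answers)//len(v) ≥ 0: Python list repetition = flatten of n copies
def solution (answers : List Int) : List Int :=
  let corrects_cnt : List (Int × Int) :=
    solutionPatterns.foldl (fun acc kv =>
      let v := kv.2
      let n := PySem.Int.floordiv (PySem.List.len answers) (PySem.List.len v)
      let r := PySem.Int.mod (PySem.List.len answers) (PySem.List.len v)
      let target := (List.replicate n.toNat v).flatten ++ PySem.List.slice v none (some r)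
      let corrects := ((target.zip answers).filter (fun p => p.1 == p.2)).map (fun p => p.2)
      acc ++ [(kv.1, (corrects.length : Int))]) []
  -- max(corrects_cnt, key=lambda x: x[1])[-1]; corrects_cnt is never empty (3 patterns)
  let maxx : Int := match PySem.List.max? corrects_cnt (fun x => x.2) with
    | some m => m.2
    | none => 0
  PySem.List.sorted ((corrects_cnt.filter (fun x => x.2 == maxx)).map (fun x => x.1)) (fun x => x) false

-- ===== PORT B =====
-- p1[i % 5] etc.: the index is always in range, so pyGetD's default 0 is never used
def solution_alt (answers : List Int) : List Int :=
  let p1 : List Int := [1, 2, 3, 4, 5]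
  let p2 : List Int := [2, 1, 2, 3, 2, 4, 2, 5]
  let p3 : List Int := [3, 3, 1, 1, 2, 2, 4, 4, 5, 5]
  let c := (PySem.List.enumerate answers 0).foldl
    (fun (c : Int × Int × Int) ia =>
      let c1 := if ia.2 == PySem.List.pyGetD p1 (PySem.Int.mod ia.1 5) 0 then c.1 + 1 else c.1
      let c2 := if ia.2 == PySem.List.pyGetD p2 (PySem.Int.mod ia.1 8) 0 then c.2.1 + 1 else c.2.1
      let c3 := if ia.2 == PySem.List.pyGetD p3 (PySem.Int.mod ia.1 10) 0 then c.2.2 + 1 else c.2.2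
      (c1, c2, c3)) (0, 0, 0)
  let m := max c.1 (max c.2.1 c.2.2)
  (([(1, c.1), (2, c.2.1), (3, c.2.2)] : List (Int × Int)).filter (fun p => p.2 == m)).map (fun p => p.1)

-- ===== PRECONDITION & SPEC =====
def Spec_solution (answers : List Int) (out : List Int) : Prop := out = solution_alt answers
instance (answers : List Int) (out : List Int) : Decidable (Spec_solution answers out) := by unfold Spec_solution; infer_instance

-- ===== CLAIM (what is proved, stated in full; the proofs are below) =====
def Claim_equal_solution : Prop := ∀ (answers : List Int), Dom_solution answers → Spec_solution answers (solution answers)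

-- ===== LEMMAS AND PROOFS =====

-- the common count: number of j with answers[j] = v[(i+j) % len v]
def countAux (v : List Int) : Nat → List Int → Nat
  | _, [] => 0
  | i, a :: as => (if a == v.getD (i % v.length) 0 then 1 else 0) + countAux v (i + 1) as

lemma take_eq_map_range (v : List Int) (m : Nat) (h : m ≤ v.length) :
    v.take m = (List.range m).map (fun i => v.getD i 0) := by
  apply List.ext_getElem
  · simp [Nat.min_eq_left h]
  · intro i h1 h2
    have hi : i < m := by simpa using h2
    simp [List.getD_eq_getElem?_getD, List.getElem?_eq_getElem (Nat.lt_of_lt_of_le hi h)]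

lemma map_range_mod_self (v : List Int) :
    (List.range v.length).map (fun i => v.getD (i % v.length) 0) = v := by
  have ht := take_eq_map_range v v.length (le_refl _)
  rw [List.take_length] at ht
  calc (List.range v.length).map (fun i => v.getD (i % v.length) 0)
      = (List.range v.length).map (fun i => v.getD i 0) := by
        apply List.map_congr_left
        intro i hi
        rw [Nat.mod_eq_of_lt (List.mem_range.mp hi)]
    _ = v := ht.symm

lemma cycle_eq_map_range (v : List Int) (hv : v ≠ []) (n r : Nat) (hr : r ≤ v.length) :
    (List.replicate n v).flatten ++ v.take r
      = (List.range (n * v.length + r)).map (fun i => v.getD (i % v.length) 0) := by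
  have hL : 0 < v.length := List.length_pos_iff.mpr hv
  induction n with
  | zero =>
      simp only [List.replicate, List.flatten_nil, List.nil_append, Nat.zero_mul, Nat.zero_add]
      rw [take_eq_map_range v r hr]
      apply List.map_congr_left
      intro i hi
      rw [Nat.mod_eq_of_lt (Nat.lt_of_lt_of_le (List.mem_range.mp hi) hr)]
  | succ n ih =>
      have hsz : (n + 1) * v.length + r = v.length + (n * v.length + r) := by ring
      rw [hsz, List.range_add, List.map_append, List.map_map, map_range_mod_self]
      have h2 : ((fun i => v.getD (i % v.length) 0) ∘ fun x => v.length + x)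
          = fun i => v.getD (i % v.length) 0 := by
        funext x; simp [Function.comp, Nat.add_mod_left]
      rw [h2, ← ih, List.replicate_succ, List.flatten_cons, List.append_assoc]

lemma zipcount (v : List Int) (ys : List Int) : ∀ (i : Nat),
    ((((List.range ys.length).map (fun j => v.getD ((i + j) % v.length) 0)).zip ys).filter
      (fun p => p.1 == p.2)).length = countAux v i ys := by
  induction ys with
  | nil => intro i; simp [countAux]
  | cons y ys ih =>
      intro i
      simp only [List.length_cons, List.range_succ_eq_map, List.map_cons, List.map_map,
        List.zip_cons_cons, List.filter_cons]
      have hf : ((fun j => v.getD ((i + j) % v.length) 0) ∘ Nat.succ)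
          = fun j => v.getD (((i + 1) + j) % v.length) 0 := by
        funext j
        simp only [Function.comp, Nat.succ_eq_add_one]
        ring_nf
      rw [hf]
      simp only [Nat.add_zero, countAux, ← ih (i + 1), beq_iff_eq]
      by_cases hc : y = v.getD (i % v.length) 0
      · rw [if_pos (by rw [hc]), if_pos hc]
        simp [Nat.add_comm]
      · rw [if_neg (fun h => hc h.symm), if_neg hc]
        simp

-- A's per-pattern count equals the shared modulo count
lemma acount (v : List Int) (hv : v ≠ []) (answers : List Int) :
    ((((List.replicate (PySem.Int.floordiv (PySem.List.len answers) (PySem.List.len v)).toNat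
          v).flatten
        ++ PySem.List.slice v none (some (PySem.Int.mod (PySem.List.len answers)
            (PySem.List.len v)))).zip
          answers).filter (fun p => p.1 == p.2)).length = countAux v 0 answers := by
  have hL : 0 < v.length := List.length_pos_iff.mpr hv
  simp only [PySem.List.len_eq, PySem.Int.floordiv_natCast, PySem.Int.mod_natCast,
    Int.toNat_natCast, PySem.List.slice_to_natCast]
  rw [cycle_eq_map_range v hv (answers.length / v.length) (answers.length % v.length)
    (le_of_lt (Nat.mod_lt _ hL))]
  have hN : answers.length / v.length * v.length + answers.length % v.length = answers.length := by
    rw [mul_comm]; exact Nat.div_add_mod answers.length v.length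
  rw [hN]
  have hz := zipcount v answers 0
  simp only [Nat.zero_add] at hz
  exact hz

-- B's single pass accumulates the three shared modulo counts
lemma bfold (ys : List Int) : ∀ (s : Nat) (c1 c2 c3 : Int),
    (PySem.List.enumerate ys (s : Int)).foldl
      (fun (c : Int × Int × Int) ia =>
        let c1 := if ia.2 == PySem.List.pyGetD ([1, 2, 3, 4, 5] : List Int) (PySem.Int.mod ia.1 5) 0 then c.1 + 1 else c.1
        let c2 := if ia.2 == PySem.List.pyGetD ([2, 1, 2, 3, 2, 4, 2, 5] : List Int) (PySem.Int.mod ia.1 8) 0 then c.2.1 + 1 else c.2.1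
        let c3 := if ia.2 == PySem.List.pyGetD ([3, 3, 1, 1, 2, 2, 4, 4, 5, 5] : List Int) (PySem.Int.mod ia.1 10) 0 then c.2.2 + 1 else c.2.2
        (c1, c2, c3)) (c1, c2, c3)
    = (c1 + countAux [1, 2, 3, 4, 5] s ys, c2 + countAux [2, 1, 2, 3, 2, 4, 2, 5] s ys,
       c3 + countAux [3, 3, 1, 1, 2, 2, 4, 4, 5, 5] s ys) := by
  induction ys with
  | nil => intro s c1 c2 c3; simp [countAux]
  | cons y ys ih =>
      intro s c1 c2 c3
      rw [PySem.List.enumerate_cons, List.foldl_cons]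
      have m5 : PySem.Int.mod (s : Int) 5 = ((s % 5 : Nat) : Int) := by
        exact_mod_cast PySem.Int.mod_natCast s 5
      have m8 : PySem.Int.mod (s : Int) 8 = ((s % 8 : Nat) : Int) := by
        exact_mod_cast PySem.Int.mod_natCast s 8
      have m10 : PySem.Int.mod (s : Int) 10 = ((s % 10 : Nat) : Int) := by
        exact_mod_cast PySem.Int.mod_natCast s 10
      simp only [m5, m8, m10, PySem.List.pyGetD_natCast]
      have hs1 : ((s : Int) + 1) = (((s + 1 : Nat)) : Int) := by push_cast; ring
      rw [hs1, ih (s + 1)]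
      simp only [countAux, List.length_cons, List.length_nil]
      refine Prod.ext ?_ (Prod.ext ?_ ?_)
      all_goals
        simp only []
        split_ifs <;> push_cast <;> ring

-- bfold at the actual start state of B
lemma bfold0 (ys : List Int) :
    (PySem.List.enumerate ys (0 : Int)).foldl
      (fun (c : Int × Int × Int) ia =>
        let c1 := if ia.2 == PySem.List.pyGetD ([1, 2, 3, 4, 5] : List Int) (PySem.Int.mod ia.1 5) 0 then c.1 + 1 else c.1
        let c2 := if ia.2 == PySem.List.pyGetD ([2, 1, 2, 3, 2, 4, 2, 5] : List Int) (PySem.Int.mod ia.1 8) 0 then c.2.1 + 1 else c.2.1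
        let c3 := if ia.2 == PySem.List.pyGetD ([3, 3, 1, 1, 2, 2, 4, 4, 5, 5] : List Int) (PySem.Int.mod ia.1 10) 0 then c.2.2 + 1 else c.2.2
        (c1, c2, c3)) (0, 0, 0)
    = ((countAux [1, 2, 3, 4, 5] 0 ys : Int), (countAux [2, 1, 2, 3, 2, 4, 2, 5] 0 ys : Int),
       (countAux [3, 3, 1, 1, 2, 2, 4, 4, 5, 5] 0 ys : Int)) := by
  have h := bfold ys 0 0 0 0
  simpa using h

-- the value picked by max(…, key=x[1])[-1] is max(c1,c2,c3)
lemma maxkey (c1 c2 c3 : Int) :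
    (match PySem.List.max? ([(1, c1), (2, c2), (3, c3)] : List (Int × Int)) (fun x => x.2) with
      | some m => m.2
      | none => 0) = max c1 (max c2 c3) := by
  cases h : PySem.List.max? ([(1, c1), (2, c2), (3, c3)] : List (Int × Int)) (fun x => x.2) with
  | none =>
      rw [PySem.List.max?_eq_none_iff] at h
      simp at h
  | some m =>
      have hmem := PySem.List.max?_mem h
      have hmax := PySem.List.max?_isMax h
      have h1 := hmax (1, c1) (by simp)
      have h2 := hmax (2, c2) (by simp)
      have h3 := hmax (3, c3) (by simp)
      simp only [List.mem_cons, List.not_mem_nil, or_false] at hmem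
      apply le_antisymm
      · rcases hmem with hm | hm | hm <;> rw [hm] <;>
          simp
      · exact max_le h1 (max_le h2 h3)

-- the filtered winners are already sorted (keys 1,2,3 in order)
lemma selsort (c1 c2 c3 m : Int) :
    PySem.List.sorted ((([(1, c1), (2, c2), (3, c3)] : List (Int × Int)).filter
        (fun x => x.2 == m)).map (fun x => x.1)) (fun x => x) false
      = (([(1, c1), (2, c2), (3, c3)] : List (Int × Int)).filter (fun x => x.2 == m)).map
          (fun x => x.1) := by
  cases h1 : (c1 == m) <;> cases h2 : (c2 == m) <;> cases h3 : (c3 == m) <;>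
    simp [List.filter, h1, h2, h3] <;> decide

-- ===== VERDICT (by name: the statement is the Claim_ definition above) =====
theorem solution_spec : Claim_equal_solution := by
  intro answers _
  show solution answers = solution_alt answers
  unfold solution solution_alt solutionPatterns
  simp only [List.foldl_cons, List.foldl_nil, List.nil_append, List.cons_append, List.length_map]
  rw [acount _ (by simp) answers, acount _ (by simp) answers, acount _ (by simp) answers]
  rw [bfold0 answers]
  rw [maxkey, selsort]
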